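-- pv_equiv track=rewrite | github.com/restlessnites/event-importer | scripts/coverage_report.py | group_files_by_category
-- ===== SOURCE A (Python) =====
-- def group_files_by_category(files):
--     """Group files into categories based on their path."""
--     categories = {
--         "Interfaces": [],
--         "Core": [],
--         "Services": [],
--         "Agents": [],
--         "Integrations": [],
--         "Other": [],
--     }
--     for file_data in files:
--         name = file_data["name"]
--         if "interfaces/" in name:
--             categories["Interfaces"].append(file_data)
--         elif "core/" in name:
--             categories["Core"].append(file_data)
--         elif "services/" in name:
--             categories["Services"].append(file_data)
--         elif "agents/" in name:
--             categories["Agents"].append(file_data)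
--         elif "integrations/" in name:
--             categories["Integrations"].append(file_data)
--         else:
--             categories["Other"].append(file_data)
--     return categories
-- ===== SOURCE B (Python) =====
-- RULES = [
--     ("interfaces/", "Interfaces"),
--     ("core/", "Core"),
--     ("services/", "Services"),
--     ("agents/", "Agents"),
--     ("integrations/", "Integrations"),
-- ]
--
--
-- def _category(name):
--     hits = [cat for sub, cat in RULES if sub in name]
--     return hits[0] if hits else "Other"
--
--
-- def group_files_by_category(files):
--     """Group files into categories based on their path."""
--     cats = [cat for _, cat in RULES] + ["Other"]
--     return {c: [fd for fd in files if _category(fd["name"]) == c] for c in cats}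
-- ===== Notes on version B (the rewrite author's own statement) =====
-- stated objective: alternative
-- what changed: Instead of one pass that mutates six buckets via an if/elif cascade, B classifies a name by collecting all matching rules and taking the first, and builds each category with its own filter pass (a dict comprehension of per-category filters).
-- outside the precondition, e.g. on group_files_by_category([{'path': 'core/a.py'}]): A raises KeyError, B raises KeyError
import Mathlib
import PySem

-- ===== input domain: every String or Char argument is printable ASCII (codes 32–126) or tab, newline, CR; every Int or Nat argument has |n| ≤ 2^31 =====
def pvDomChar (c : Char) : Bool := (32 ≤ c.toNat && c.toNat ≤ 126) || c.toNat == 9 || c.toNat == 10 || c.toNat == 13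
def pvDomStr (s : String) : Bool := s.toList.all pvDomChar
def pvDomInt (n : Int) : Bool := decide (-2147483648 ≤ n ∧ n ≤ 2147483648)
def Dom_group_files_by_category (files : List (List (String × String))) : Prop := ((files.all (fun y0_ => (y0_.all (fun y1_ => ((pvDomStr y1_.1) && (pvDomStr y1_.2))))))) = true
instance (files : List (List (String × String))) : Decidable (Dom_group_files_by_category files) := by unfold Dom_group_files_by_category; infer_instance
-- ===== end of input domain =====

-- B replaces A's single pass with a mutated six-bucket dict by a pure classification function
-- (first of all matching rules) and one independent filter pass per category (alternative; same result).

-- file_data["name"]: first-match lookup in the association list (Pre_ guarantees the key exists)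
def pvNameOf (fd : List (String × String)) : String :=
  ((fd.find? (fun p => p.1 == "name")).map (·.2)).getD ""

-- ===== PORT A =====
def pvStepA (cats : PySem.Dict String (List (List (String × String)))) (fd : List (String × String)) :
    PySem.Dict String (List (List (String × String))) :=
  let name := pvNameOf fd
  if PySem.Str.isIn "interfaces/" name then cats.modify "Interfaces" [] (· ++ [fd])
  else if PySem.Str.isIn "core/" name then cats.modify "Core" [] (· ++ [fd])
  else if PySem.Str.isIn "services/" name then cats.modify "Services" [] (· ++ [fd])
  else if PySem.Str.isIn "agents/" name then cats.modify "Agents" [] (· ++ [fd])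
  else if PySem.Str.isIn "integrations/" name then cats.modify "Integrations" [] (· ++ [fd])
  else cats.modify "Other" [] (· ++ [fd])

def group_files_by_category (files : List (List (String × String))) : List (String × List (List (String × String))) :=
  (files.foldl pvStepA (PySem.Dict.ofList
    [("Interfaces", []), ("Core", []), ("Services", []), ("Agents", []), ("Integrations", []), ("Other", [])])).items

-- ===== PORT B =====
def pvRules : List (String × String) :=
  [("interfaces/", "Interfaces"), ("core/", "Core"), ("services/", "Services"),
   ("agents/", "Agents"), ("integrations/", "Integrations")]

-- _category(name): all matching rules' categories; the first one, or "Other" if none match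
def pvCategory (name : String) : String :=
  let hits := (pvRules.filter (fun r => PySem.Str.isIn r.1 name)).map (·.2)
  match hits with
  | [] => "Other"
  | c :: _ => c

def group_files_by_category_alt (files : List (List (String × String))) : List (String × List (List (String × String))) :=
  let cats := pvRules.map (·.2) ++ ["Other"]
  cats.map (fun c => (c, files.filter (fun fd => pvCategory (pvNameOf fd) == c)))

-- ===== PRECONDITION & SPEC =====
-- Pre_ excludes files lacking a "name" key, on which the Python A raises KeyError (B raises there too).
def Pre_group_files_by_category (files : List (List (String × String))) : Prop :=
  (files.all (fun fd => (fd.find? (fun p => p.1 == "name")).isSome)) = true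
instance (files : List (List (String × String))) : Decidable (Pre_group_files_by_category files) := by unfold Pre_group_files_by_category; infer_instance

def pvWitness_group_files_by_category : (List (List (String × String))) :=
  [[("name", "src/core/app.py")], [("name", "docs/readme.md"), ("size", "3")]]

def Spec_group_files_by_category (files : List (List (String × String))) (out : List (String × List (List (String × String)))) : Prop := out = group_files_by_category_alt files
instance (files : List (List (String × String))) (out : List (String × List (List (String × String)))) : Decidable (Spec_group_files_by_category files out) := by unfold Spec_group_files_by_category; infer_instance

-- ===== CLAIM (what is proved, stated in full; the proofs are below) =====
def Claim_equal_group_files_by_category : Prop := ∀ (files : List (List (String × String))), Dom_group_files_by_category files → Pre_group_files_by_category files → Spec_group_files_by_category files (group_files_by_category files)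

-- ===== LEMMAS AND PROOFS =====

def pvCatOf (fd : List (String × String)) : String := pvCategory (pvNameOf fd)

-- A's cascade picks exactly B's classification of the file's name
lemma pvStepA_eq_modify (cats : PySem.Dict String (List (List (String × String)))) (fd : List (String × String)) :
    pvStepA cats fd = cats.modify (pvCatOf fd) [] (· ++ [fd]) := by
  unfold pvStepA pvCatOf pvCategory pvRules
  by_cases h1 : PySem.Str.isIn "interfaces/" (pvNameOf fd) = true <;>
  by_cases h2 : PySem.Str.isIn "core/" (pvNameOf fd) = true <;>
  by_cases h3 : PySem.Str.isIn "services/" (pvNameOf fd) = true <;>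
  by_cases h4 : PySem.Str.isIn "agents/" (pvNameOf fd) = true <;>
  by_cases h5 : PySem.Str.isIn "integrations/" (pvNameOf fd) = true <;>
  simp_all

-- the classification is always one of the six category names
lemma pvCatOf_cases (fd : List (String × String)) :
    pvCatOf fd = "Interfaces" ∨ pvCatOf fd = "Core" ∨ pvCatOf fd = "Services" ∨
    pvCatOf fd = "Agents" ∨ pvCatOf fd = "Integrations" ∨ pvCatOf fd = "Other" := by
  unfold pvCatOf pvCategory pvRules
  by_cases h1 : PySem.Str.isIn "interfaces/" (pvNameOf fd) = true <;>
  by_cases h2 : PySem.Str.isIn "core/" (pvNameOf fd) = true <;>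
  by_cases h3 : PySem.Str.isIn "services/" (pvNameOf fd) = true <;>
  by_cases h4 : PySem.Str.isIn "agents/" (pvNameOf fd) = true <;>
  by_cases h5 : PySem.Str.isIn "integrations/" (pvNameOf fd) = true <;>
  simp_all

-- A's initial literal dict, in constructor form
lemma pvInit_eq (l1 l2 l3 l4 l5 l6 : List (List (String × String))) :
    PySem.Dict.ofList [("Interfaces", l1), ("Core", l2), ("Services", l3), ("Agents", l4), ("Integrations", l5), ("Other", l6)]
    = PySem.Dict.mk [("Interfaces", l1), ("Core", l2), ("Services", l3), ("Agents", l4), ("Integrations", l5), ("Other", l6)] := rfl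

-- modifying each of the six keys of the literal dict
lemma pvModify_Interfaces (l1 l2 l3 l4 l5 l6 : List (List (String × String)))
    (f : List (List (String × String)) → List (List (String × String))) :
    (PySem.Dict.mk [("Interfaces", l1), ("Core", l2), ("Services", l3), ("Agents", l4), ("Integrations", l5), ("Other", l6)]).modify "Interfaces" [] f = PySem.Dict.mk [("Interfaces", f l1), ("Core", l2), ("Services", l3), ("Agents", l4), ("Integrations", l5), ("Other", l6)] := rfl

lemma pvModify_Core (l1 l2 l3 l4 l5 l6 : List (List (String × String)))
    (f : List (List (String × String)) → List (List (String × String))) :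
    (PySem.Dict.mk [("Interfaces", l1), ("Core", l2), ("Services", l3), ("Agents", l4), ("Integrations", l5), ("Other", l6)]).modify "Core" [] f = PySem.Dict.mk [("Interfaces", l1), ("Core", f l2), ("Services", l3), ("Agents", l4), ("Integrations", l5), ("Other", l6)] := rfl

lemma pvModify_Services (l1 l2 l3 l4 l5 l6 : List (List (String × String)))
    (f : List (List (String × String)) → List (List (String × String))) :
    (PySem.Dict.mk [("Interfaces", l1), ("Core", l2), ("Services", l3), ("Agents", l4), ("Integrations", l5), ("Other", l6)]).modify "Services" [] f = PySem.Dict.mk [("Interfaces", l1), ("Core", l2), ("Services", f l3), ("Agents", l4), ("Integrations", l5), ("Other", l6)] := rfl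

lemma pvModify_Agents (l1 l2 l3 l4 l5 l6 : List (List (String × String)))
    (f : List (List (String × String)) → List (List (String × String))) :
    (PySem.Dict.mk [("Interfaces", l1), ("Core", l2), ("Services", l3), ("Agents", l4), ("Integrations", l5), ("Other", l6)]).modify "Agents" [] f = PySem.Dict.mk [("Interfaces", l1), ("Core", l2), ("Services", l3), ("Agents", f l4), ("Integrations", l5), ("Other", l6)] := rfl

lemma pvModify_Integrations (l1 l2 l3 l4 l5 l6 : List (List (String × String)))
    (f : List (List (String × String)) → List (List (String × String))) :
    (PySem.Dict.mk [("Interfaces", l1), ("Core", l2), ("Services", l3), ("Agents", l4), ("Integrations", l5), ("Other", l6)]).modify "Integrations" [] f = PySem.Dict.mk [("Interfaces", l1), ("Core", l2), ("Services", l3), ("Agents", l4), ("Integrations", f l5), ("Other", l6)] := rfl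

lemma pvModify_Other (l1 l2 l3 l4 l5 l6 : List (List (String × String)))
    (f : List (List (String × String)) → List (List (String × String))) :
    (PySem.Dict.mk [("Interfaces", l1), ("Core", l2), ("Services", l3), ("Agents", l4), ("Integrations", l5), ("Other", l6)]).modify "Other" [] f = PySem.Dict.mk [("Interfaces", l1), ("Core", l2), ("Services", l3), ("Agents", l4), ("Integrations", l5), ("Other", f l6)] := rfl

-- the fold over A's step, on the six-key dict, produces exactly the per-category filters
lemma pv_fold_items (files : List (List (String × String)))
    (l1 l2 l3 l4 l5 l6 : List (List (String × String))) :
    (files.foldl pvStepA (PySem.Dict.mk [("Interfaces", l1), ("Core", l2), ("Services", l3), ("Agents", l4), ("Integrations", l5), ("Other", l6)])).items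
    = [("Interfaces", l1 ++ files.filter (fun fd => pvCatOf fd == "Interfaces")),
       ("Core", l2 ++ files.filter (fun fd => pvCatOf fd == "Core")),
       ("Services", l3 ++ files.filter (fun fd => pvCatOf fd == "Services")),
       ("Agents", l4 ++ files.filter (fun fd => pvCatOf fd == "Agents")),
       ("Integrations", l5 ++ files.filter (fun fd => pvCatOf fd == "Integrations")),
       ("Other", l6 ++ files.filter (fun fd => pvCatOf fd == "Other"))] := by
  induction files generalizing l1 l2 l3 l4 l5 l6 with
  | nil => simp
  | cons fd fs ih =>
    rw [List.foldl_cons, pvStepA_eq_modify]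
    rcases pvCatOf_cases fd with h | h | h | h | h | h
    · rw [h, pvModify_Interfaces, ih]
      simp [h]
    · rw [h, pvModify_Core, ih]
      simp [h]
    · rw [h, pvModify_Services, ih]
      simp [h]
    · rw [h, pvModify_Agents, ih]
      simp [h]
    · rw [h, pvModify_Integrations, ih]
      simp [h]
    · rw [h, pvModify_Other, ih]
      simp [h]

-- ===== VERDICT (by name: the statement is the Claim_ definition above) =====
theorem group_files_by_category_spec : Claim_equal_group_files_by_category := by
  intro files _ _
  unfold Spec_group_files_by_category group_files_by_category group_files_by_category_alt pvRules
  rw [pvInit_eq, pv_fold_items]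
  simp [pvCatOf]
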